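-- pv_equiv track=rewrite | github.com/justinlietz93/Prometheus_VDM | FUM_Demo_original/fum_utd.py | _invert_actuator_map
-- ===== SOURCE A (Python) =====
-- def _invert_actuator_map(actuator_map):
--     """Helper to create a mapping from group name to neuron indices."""
--     groups = {}
--     for neuron_idx, mapping in actuator_map.items():
--         group_name = mapping.get('group_name')
--         if group_name:
--             if group_name not in groups:
--                 groups[group_name] = []
--             groups[group_name].append(neuron_idx)
--     return groups
-- ===== SOURCE B (Python) =====
-- def _invert_actuator_map(actuator_map):
--     """Helper to create a mapping from group name to neuron indices."""
--     pairs = [(m.get('group_name'), idx)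
--              for idx, m in actuator_map.items() if m.get('group_name')]
--     order = dict.fromkeys(g for g, _ in pairs)
--     return {g: [idx for h, idx in pairs if h == g] for g in order}
-- ===== Notes on version B (the rewrite author's own statement) =====
-- stated objective: alternative
-- what changed: Replaces A's single pass that upserts into a dict of lists with a declarative pipeline: build the filtered (group, idx) pair list once, dedup the group names in first-occurrence order, then gather each group's indices by a per-group scan of the pair list.
import Mathlib
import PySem

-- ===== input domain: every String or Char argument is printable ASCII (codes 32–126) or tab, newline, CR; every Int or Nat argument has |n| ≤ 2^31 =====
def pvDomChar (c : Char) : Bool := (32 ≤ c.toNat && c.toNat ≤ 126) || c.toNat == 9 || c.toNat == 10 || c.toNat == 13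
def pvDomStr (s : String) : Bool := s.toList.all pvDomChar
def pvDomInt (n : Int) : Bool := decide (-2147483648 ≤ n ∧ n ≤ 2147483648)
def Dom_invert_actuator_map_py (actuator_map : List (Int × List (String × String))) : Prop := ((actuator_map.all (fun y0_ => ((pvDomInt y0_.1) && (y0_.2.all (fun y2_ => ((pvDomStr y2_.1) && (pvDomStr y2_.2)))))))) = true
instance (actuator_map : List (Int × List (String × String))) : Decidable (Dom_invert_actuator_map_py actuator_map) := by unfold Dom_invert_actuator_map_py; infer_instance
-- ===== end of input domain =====

-- B replaces A's incremental dict-of-lists loop by one list comprehension of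
-- (group, idx) pairs followed by a dedup of the group names and a per-group
-- gather; objective: alternative (not faster), same return value.

-- ===== PORT A =====
-- loop: for neuron_idx, mapping in actuator_map.items(): if mapping.get('group_name'): upsert
def invert_actuator_map_py (actuator_map : List (Int × List (String × String))) : List (String × List Int) :=
  (actuator_map.foldl
    (fun (groups : PySem.Dict String (List Int)) p =>
      match (PySem.Dict.mk p.2).get? "group_name" with
      | none => groups
      | some g =>
        if g = "" then groups
        else
          -- 'if group_name not in groups: groups[group_name] = []'
          let groups1 := if groups.contains g then groups else groups.insert g []
          -- 'groups[group_name].append(neuron_idx)'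
          groups1.modify g [] (fun l => l ++ [p.1]))
    PySem.Dict.empty).items

-- ===== PORT B =====
-- pairs = [(m.get('group_name'), idx) for idx, m in actuator_map.items() if m.get('group_name')]
-- order = dict.fromkeys(g for g, _ in pairs);  {g: [idx for h, idx in pairs if h == g] for g in order}
def invert_actuator_map_py_alt (actuator_map : List (Int × List (String × String))) : List (String × List Int) :=
  let pairs : List (String × Int) := actuator_map.filterMap (fun p =>
    match (PySem.Dict.mk p.2).get? "group_name" with
    | none => none
    | some g => if g = "" then none else some (g, p.1))
  (PySem.List.dedup (pairs.map (·.1))).map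
    (fun g => (g, (pairs.filter (fun q => q.1 == g)).map (·.2)))

-- ===== PRECONDITION & SPEC =====
def Spec_invert_actuator_map_py (actuator_map : List (Int × List (String × String))) (out : List (String × List Int)) : Prop := out = invert_actuator_map_py_alt actuator_map
instance (actuator_map : List (Int × List (String × String))) (out : List (String × List Int)) : Decidable (Spec_invert_actuator_map_py actuator_map out) := by unfold Spec_invert_actuator_map_py; infer_instance

-- ===== CLAIM (what is proved, stated in full; the proofs are below) =====
def Claim_equal_invert_actuator_map_py : Prop := ∀ (actuator_map : List (Int × List (String × String))), Dom_invert_actuator_map_py actuator_map → Spec_invert_actuator_map_py actuator_map (invert_actuator_map_py actuator_map)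

-- ===== LEMMAS AND PROOFS =====

-- Ensuring the key exists with an empty list and then appending is one 'modify'.
lemma ensure_then_append (d : PySem.Dict String (List Int)) (g : String) (i : Int) :
    (if d.contains g then d else d.insert g []).modify g [] (fun l => l ++ [i])
      = d.modify g [] (fun l => l ++ [i]) := by
  by_cases h : d.contains g
  · simp [h]
  · have hf : d.contains g = false := by simpa using h
    simp only [hf, Bool.false_eq_true, ite_false, PySem.Dict.modify,
      PySem.Dict.insert_insert_self, PySem.Dict.getD_insert_self,
      PySem.Dict.getD_of_not_contains d [] hf]

-- A's loop over the full map equals the grouping loop over B's filtered pair list.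
lemma foldl_eq_pairs (actuator_map : List (Int × List (String × String)))
    (d : PySem.Dict String (List Int)) :
    actuator_map.foldl
      (fun (groups : PySem.Dict String (List Int)) p =>
        match (PySem.Dict.mk p.2).get? "group_name" with
        | none => groups
        | some g =>
          if g = "" then groups
          else
            let groups1 := if groups.contains g then groups else groups.insert g []
            groups1.modify g [] (fun l => l ++ [p.1])) d
    = (actuator_map.filterMap (fun p =>
        match (PySem.Dict.mk p.2).get? "group_name" with
        | none => none
        | some g => if g = "" then none else some (g, p.1))).foldl
        (fun d q => d.modify q.1 [] (fun l => l ++ [q.2])) d := by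
  rw [List.foldl_filterMap]
  induction actuator_map generalizing d with
  | nil => rfl
  | cons p t ih =>
    simp only [List.foldl_cons]
    rcases hg : (PySem.Dict.mk p.2).get? "group_name" with _ | g
    · simpa using ih d
    · by_cases he : g = ""
      · simp [he, ih]
      · simp only [he, ite_false]
        rw [ensure_then_append]
        exact ih _

theorem invert_actuator_map_py_eq (actuator_map : List (Int × List (String × String))) :
    invert_actuator_map_py actuator_map = invert_actuator_map_py_alt actuator_map := by
  unfold invert_actuator_map_py invert_actuator_map_py_alt
  rw [foldl_eq_pairs]
  set pairs := actuator_map.filterMap (fun p =>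
    match (PySem.Dict.mk p.2).get? "group_name" with
    | none => none
    | some g => if g = "" then none else some (g, p.1)) with hp
  have hnd : ((pairs.foldl (fun d q => d.modify q.1 [] (fun l => l ++ [q.2]))
      (PySem.Dict.empty : PySem.Dict String (List Int))).keys).Nodup := by
    exact PySem.Dict.nodup_keys_foldl_modify_key pairs Prod.fst []
      (fun _ q => (fun l => l ++ [q.2])) _ (by simp [PySem.Dict.keys_empty])
  rw [PySem.Dict.items_eq_map_keys _ hnd []]
  rw [PySem.Dict.keys_foldl_modify_key pairs Prod.fst [] (fun _ q => (fun l => l ++ [q.2]))]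
  simp only [PySem.Dict.keys_empty, PySem.Set.update_nil_left, ← PySem.List.dedup_eq_ofList]
  refine List.map_congr_left (fun g _ => ?_)
  rw [PySem.Dict.getD_foldl_modify_append]
  simp [PySem.Dict.getD_empty]

-- ===== VERDICT (by name: the statement is the Claim_ definition above) =====
theorem invert_actuator_map_py_spec : Claim_equal_invert_actuator_map_py := by
  intro am _
  exact invert_actuator_map_py_eq am
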